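-- pv_equiv track=rewrite | github.com/dxbiau/propai | nexusprop/agents/personal_research.py | postcode_to_state
-- ===== SOURCE A (Python) =====
-- POSTCODE_STATE_MAP = [
--     (1000, 2599, "NSW"), (2619, 2899, "NSW"), (2921, 2999, "NSW"),
--     (2600, 2618, "ACT"), (2900, 2920, "ACT"),
--     (3000, 3999, "VIC"),
--     (4000, 4999, "QLD"),
--     (5000, 5799, "SA"),
--     (6000, 6797, "WA"),
--     (7000, 7799, "TAS"),
--     (800, 899, "NT"), (900, 999, "NT"),
-- ]
--
-- def postcode_to_state(postcode: str) -> str: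
--     """Resolve Australian state from postcode."""
--     try:
--         pc = int(postcode)
--     except (ValueError, TypeError):
--         return "NSW"
--     for low, high, state in POSTCODE_STATE_MAP:
--         if low <= pc <= high:
--             return state
--     return "NSW"
-- ===== SOURCE B (Python) =====
-- _LOWS = [800, 900, 1000, 2600, 2619, 2900, 2921, 3000, 4000, 5000, 6000, 7000]
-- _ENTRIES = [(899, "NT"), (999, "NT"), (2599, "NSW"), (2618, "ACT"),
--             (2899, "NSW"), (2920, "ACT"), (2999, "NSW"), (3999, "VIC"),
--             (4999, "QLD"), (5799, "SA"), (6797, "WA"), (7799, "TAS")]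
--
--
-- def postcode_to_state(postcode: str) -> str:
--     """Resolve Australian state from postcode."""
--     try:
--         pc = int(postcode)
--     except (ValueError, TypeError):
--         return "NSW"
--     # bisect_right over the sorted interval start-points
--     lo, hi = 0, len(_LOWS)
--     while lo < hi:
--         mid = (lo + hi) // 2
--         if pc < _LOWS[mid]:
--             hi = mid
--         else:
--             lo = mid + 1
--     if lo > 0:
--         high, state = _ENTRIES[lo - 1]
--         if pc <= high:
--             return state
--     return "NSW"
-- ===== Notes on version B (the rewrite author's own statement) =====
-- stated objective: alternative
-- what changed: Replaces the linear scan of the unsorted interval list with a binary search (hand-written bisect_right) over a sorted table of interval start-points, followed by a single high-bound check.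
import Mathlib
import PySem

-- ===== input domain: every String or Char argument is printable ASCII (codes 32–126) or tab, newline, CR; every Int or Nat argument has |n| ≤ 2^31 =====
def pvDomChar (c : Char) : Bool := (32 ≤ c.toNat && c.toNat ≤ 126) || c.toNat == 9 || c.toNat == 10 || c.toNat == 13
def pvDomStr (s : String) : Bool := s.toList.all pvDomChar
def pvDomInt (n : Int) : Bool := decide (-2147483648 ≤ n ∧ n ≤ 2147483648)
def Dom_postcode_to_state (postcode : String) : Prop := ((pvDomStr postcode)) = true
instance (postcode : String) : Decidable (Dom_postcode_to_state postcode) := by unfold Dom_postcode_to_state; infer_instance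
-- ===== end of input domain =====

-- B replaces A's linear scan of the unsorted interval list with a binary search over a
-- sorted table of interval start-points plus one high-bound check (alternative structure).


-- ===== PORT A =====
def pvMapA : List (Int × Int × String) :=
  [(1000, 2599, "NSW"), (2619, 2899, "NSW"), (2921, 2999, "NSW"),
   (2600, 2618, "ACT"), (2900, 2920, "ACT"),
   (3000, 3999, "VIC"),
   (4000, 4999, "QLD"),
   (5000, 5799, "SA"),
   (6000, 6797, "WA"),
   (7000, 7799, "TAS"),
   (800, 899, "NT"), (900, 999, "NT")]

def pvScanA (pc : Int) : List (Int × Int × String) → String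
  | [] => "NSW"
  | (low, high, state) :: rest =>
      if low ≤ pc ∧ pc ≤ high then state else pvScanA pc rest

def postcode_to_state (postcode : String) : String :=
  match PySem.Int.ofStr? postcode with
  | none => "NSW"
  | some pc => pvScanA pc pvMapA

-- ===== PORT B =====
def pvLowsB : List Int := [800, 900, 1000, 2600, 2619, 2900, 2921, 3000, 4000, 5000, 6000, 7000]

def pvEntriesB : List (Int × String) :=
  [(899, "NT"), (999, "NT"), (2599, "NSW"), (2618, "ACT"),
   (2899, "NSW"), (2920, "ACT"), (2999, "NSW"), (3999, "VIC"),
   (4999, "QLD"), (5799, "SA"), (6797, "WA"), (7799, "TAS")]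

-- the `while lo < hi` bisect_right loop of Source B, step for step
def pvBisectB (pc : Int) (lo hi : Nat) : Nat :=
  if lo < hi then
    let mid := (lo + hi) / 2
    if pc < pvLowsB.getD mid 0 then pvBisectB pc lo mid
    else pvBisectB pc (mid + 1) hi
  else lo
termination_by hi - lo
decreasing_by all_goals omega

def pvFinishB (pc : Int) (lo : Nat) : String :=
  if lo > 0 then
    let e := pvEntriesB.getD (lo - 1) (0, "")
    if pc ≤ e.1 then e.2 else "NSW"
  else "NSW"

def postcode_to_state_alt (postcode : String) : String :=
  match PySem.Int.ofStr? postcode with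
  | none => "NSW"
  | some pc => pvFinishB pc (pvBisectB pc 0 pvLowsB.length)

-- ===== PRECONDITION & SPEC =====
def Spec_postcode_to_state (postcode : String) (out : String) : Prop := out = postcode_to_state_alt postcode
instance (postcode : String) (out : String) : Decidable (Spec_postcode_to_state postcode out) := by unfold Spec_postcode_to_state; infer_instance

-- ===== CLAIM (what is proved, stated in full; the proofs are below) =====
def Claim_equal_postcode_to_state : Prop := ∀ (postcode : String), Dom_postcode_to_state postcode → Spec_postcode_to_state postcode (postcode_to_state postcode)

-- ===== LEMMAS AND PROOFS =====
lemma pvBis_0 (pc : Int) (h2 : pc < 800) : pvBisectB pc 0 12 = 0 := by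
  rw [pvBisectB]; norm_num [pvLowsB]
  rw [if_pos (by omega : pc < (2921:Int))]
  rw [pvBisectB]; norm_num [pvLowsB]
  rw [if_pos (by omega : pc < (2600:Int))]
  rw [pvBisectB]; norm_num [pvLowsB]
  rw [if_pos (by omega : pc < (900:Int))]
  rw [pvBisectB]; norm_num [pvLowsB]
  rw [if_pos (by omega : pc < (800:Int))]
  rw [pvBisectB]; norm_num

lemma pvBis_1 (pc : Int) (h1 : 800 ≤ pc) (h2 : pc < 900) : pvBisectB pc 0 12 = 1 := by
  rw [pvBisectB]; norm_num [pvLowsB]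
  rw [if_pos (by omega : pc < (2921:Int))]
  rw [pvBisectB]; norm_num [pvLowsB]
  rw [if_pos (by omega : pc < (2600:Int))]
  rw [pvBisectB]; norm_num [pvLowsB]
  rw [if_pos (by omega : pc < (900:Int))]
  rw [pvBisectB]; norm_num [pvLowsB]
  rw [if_neg (by omega : ¬ pc < (800:Int))]
  rw [pvBisectB]; norm_num

lemma pvBis_2 (pc : Int) (h1 : 900 ≤ pc) (h2 : pc < 1000) : pvBisectB pc 0 12 = 2 := by
  rw [pvBisectB]; norm_num [pvLowsB]
  rw [if_pos (by omega : pc < (2921:Int))]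
  rw [pvBisectB]; norm_num [pvLowsB]
  rw [if_pos (by omega : pc < (2600:Int))]
  rw [pvBisectB]; norm_num [pvLowsB]
  rw [if_neg (by omega : ¬ pc < (900:Int))]
  rw [pvBisectB]; norm_num [pvLowsB]
  rw [if_pos (by omega : pc < (1000:Int))]
  rw [pvBisectB]; norm_num

lemma pvBis_3 (pc : Int) (h1 : 1000 ≤ pc) (h2 : pc < 2600) : pvBisectB pc 0 12 = 3 := by
  rw [pvBisectB]; norm_num [pvLowsB]
  rw [if_pos (by omega : pc < (2921:Int))]
  rw [pvBisectB]; norm_num [pvLowsB]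
  rw [if_pos (by omega : pc < (2600:Int))]
  rw [pvBisectB]; norm_num [pvLowsB]
  rw [if_neg (by omega : ¬ pc < (900:Int))]
  rw [pvBisectB]; norm_num [pvLowsB]
  rw [if_neg (by omega : ¬ pc < (1000:Int))]
  rw [pvBisectB]; norm_num

lemma pvBis_4 (pc : Int) (h1 : 2600 ≤ pc) (h2 : pc < 2619) : pvBisectB pc 0 12 = 4 := by
  rw [pvBisectB]; norm_num [pvLowsB]
  rw [if_pos (by omega : pc < (2921:Int))]
  rw [pvBisectB]; norm_num [pvLowsB]
  rw [if_neg (by omega : ¬ pc < (2600:Int))]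
  rw [pvBisectB]; norm_num [pvLowsB]
  rw [if_pos (by omega : pc < (2900:Int))]
  rw [pvBisectB]; norm_num [pvLowsB]
  rw [if_pos (by omega : pc < (2619:Int))]
  rw [pvBisectB]; norm_num

lemma pvBis_5 (pc : Int) (h1 : 2619 ≤ pc) (h2 : pc < 2900) : pvBisectB pc 0 12 = 5 := by
  rw [pvBisectB]; norm_num [pvLowsB]
  rw [if_pos (by omega : pc < (2921:Int))]
  rw [pvBisectB]; norm_num [pvLowsB]
  rw [if_neg (by omega : ¬ pc < (2600:Int))]
  rw [pvBisectB]; norm_num [pvLowsB]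
  rw [if_pos (by omega : pc < (2900:Int))]
  rw [pvBisectB]; norm_num [pvLowsB]
  rw [if_neg (by omega : ¬ pc < (2619:Int))]
  rw [pvBisectB]; norm_num

lemma pvBis_6 (pc : Int) (h1 : 2900 ≤ pc) (h2 : pc < 2921) : pvBisectB pc 0 12 = 6 := by
  rw [pvBisectB]; norm_num [pvLowsB]
  rw [if_pos (by omega : pc < (2921:Int))]
  rw [pvBisectB]; norm_num [pvLowsB]
  rw [if_neg (by omega : ¬ pc < (2600:Int))]
  rw [pvBisectB]; norm_num [pvLowsB]
  rw [if_neg (by omega : ¬ pc < (2900:Int))]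
  rw [pvBisectB]; norm_num

lemma pvBis_7 (pc : Int) (h1 : 2921 ≤ pc) (h2 : pc < 3000) : pvBisectB pc 0 12 = 7 := by
  rw [pvBisectB]; norm_num [pvLowsB]
  rw [if_neg (by omega : ¬ pc < (2921:Int))]
  rw [pvBisectB]; norm_num [pvLowsB]
  rw [if_pos (by omega : pc < (5000:Int))]
  rw [pvBisectB]; norm_num [pvLowsB]
  rw [if_pos (by omega : pc < (4000:Int))]
  rw [pvBisectB]; norm_num [pvLowsB]
  rw [if_pos (by omega : pc < (3000:Int))]
  rw [pvBisectB]; norm_num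

lemma pvBis_8 (pc : Int) (h1 : 3000 ≤ pc) (h2 : pc < 4000) : pvBisectB pc 0 12 = 8 := by
  rw [pvBisectB]; norm_num [pvLowsB]
  rw [if_neg (by omega : ¬ pc < (2921:Int))]
  rw [pvBisectB]; norm_num [pvLowsB]
  rw [if_pos (by omega : pc < (5000:Int))]
  rw [pvBisectB]; norm_num [pvLowsB]
  rw [if_pos (by omega : pc < (4000:Int))]
  rw [pvBisectB]; norm_num [pvLowsB]
  rw [if_neg (by omega : ¬ pc < (3000:Int))]
  rw [pvBisectB]; norm_num

lemma pvBis_9 (pc : Int) (h1 : 4000 ≤ pc) (h2 : pc < 5000) : pvBisectB pc 0 12 = 9 := by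
  rw [pvBisectB]; norm_num [pvLowsB]
  rw [if_neg (by omega : ¬ pc < (2921:Int))]
  rw [pvBisectB]; norm_num [pvLowsB]
  rw [if_pos (by omega : pc < (5000:Int))]
  rw [pvBisectB]; norm_num [pvLowsB]
  rw [if_neg (by omega : ¬ pc < (4000:Int))]
  rw [pvBisectB]; norm_num

lemma pvBis_10 (pc : Int) (h1 : 5000 ≤ pc) (h2 : pc < 6000) : pvBisectB pc 0 12 = 10 := by
  rw [pvBisectB]; norm_num [pvLowsB]
  rw [if_neg (by omega : ¬ pc < (2921:Int))]
  rw [pvBisectB]; norm_num [pvLowsB]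
  rw [if_neg (by omega : ¬ pc < (5000:Int))]
  rw [pvBisectB]; norm_num [pvLowsB]
  rw [if_pos (by omega : pc < (7000:Int))]
  rw [pvBisectB]; norm_num [pvLowsB]
  rw [if_pos (by omega : pc < (6000:Int))]
  rw [pvBisectB]; norm_num

lemma pvBis_11 (pc : Int) (h1 : 6000 ≤ pc) (h2 : pc < 7000) : pvBisectB pc 0 12 = 11 := by
  rw [pvBisectB]; norm_num [pvLowsB]
  rw [if_neg (by omega : ¬ pc < (2921:Int))]
  rw [pvBisectB]; norm_num [pvLowsB]
  rw [if_neg (by omega : ¬ pc < (5000:Int))]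
  rw [pvBisectB]; norm_num [pvLowsB]
  rw [if_pos (by omega : pc < (7000:Int))]
  rw [pvBisectB]; norm_num [pvLowsB]
  rw [if_neg (by omega : ¬ pc < (6000:Int))]
  rw [pvBisectB]; norm_num

lemma pvBis_12 (pc : Int) (h1 : 7000 ≤ pc) : pvBisectB pc 0 12 = 12 := by
  rw [pvBisectB]; norm_num [pvLowsB]
  rw [if_neg (by omega : ¬ pc < (2921:Int))]
  rw [pvBisectB]; norm_num [pvLowsB]
  rw [if_neg (by omega : ¬ pc < (5000:Int))]
  rw [pvBisectB]; norm_num [pvLowsB]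
  rw [if_neg (by omega : ¬ pc < (7000:Int))]
  rw [pvBisectB]; norm_num


lemma pvNumeric_eq (pc : Int) :
    pvScanA pc pvMapA = pvFinishB pc (pvBisectB pc 0 pvLowsB.length) := by
  rw [show pvLowsB.length = 12 from rfl]
  rcases lt_or_ge pc 800 with h0|g0
  · rw [pvBis_0 pc h0]
    simp only [pvScanA, pvMapA]; rw [if_neg (by omega : ¬((1000:Int) ≤ pc ∧ pc ≤ 2599))]; rw [if_neg (by omega : ¬((2619:Int) ≤ pc ∧ pc ≤ 2899))]; rw [if_neg (by omega : ¬((2921:Int) ≤ pc ∧ pc ≤ 2999))]; rw [if_neg (by omega : ¬((2600:Int) ≤ pc ∧ pc ≤ 2618))]; rw [if_neg (by omega : ¬((2900:Int) ≤ pc ∧ pc ≤ 2920))]; rw [if_neg (by omega : ¬((3000:Int) ≤ pc ∧ pc ≤ 3999))]; rw [if_neg (by omega : ¬((4000:Int) ≤ pc ∧ pc ≤ 4999))]; rw [if_neg (by omega : ¬((5000:Int) ≤ pc ∧ pc ≤ 5799))]; rw [if_neg (by omega : ¬((6000:Int) ≤ pc ∧ pc ≤ 6797))]; rw [if_neg (by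 omega : ¬((7000:Int) ≤ pc ∧ pc ≤ 7799))]; rw [if_neg (by omega : ¬((800:Int) ≤ pc ∧ pc ≤ 899))]; rw [if_neg (by omega : ¬((900:Int) ≤ pc ∧ pc ≤ 999))]; simp only [pvFinishB, pvEntriesB]; norm_num
    all_goals try split_ifs
    all_goals intros
    all_goals first | rfl | (exfalso; omega)
  rcases lt_or_ge pc 900 with h1|g1
  · rw [pvBis_1 pc g0 h1]
    simp only [pvScanA, pvMapA]; rw [if_neg (by omega : ¬((1000:Int) ≤ pc ∧ pc ≤ 2599))]; rw [if_neg (by omega : ¬((2619:Int) ≤ pc ∧ pc ≤ 2899))]; rw [if_neg (by omega : ¬((2921:Int) ≤ pc ∧ pc ≤ 2999))]; rw [if_neg (by omega : ¬((2600:Int) ≤ pc ∧ pc ≤ 2618))]; rw [if_neg (by omega : ¬((2900:Int) ≤ pc ∧ pc ≤ 2920))]; rw [if_neg (by omega : ¬((3000:Int) ≤ pc ∧ pc ≤ 3999))]; rw [if_neg (by omega : ¬((4000:Int) ≤ pc ∧ pc ≤ 4999))]; rw [if_neg (by omega : ¬((5000:Int) ≤ pc ∧ pc ≤ 5799))]; rw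 [if_neg (by omega : ¬((6000:Int) ≤ pc ∧ pc ≤ 6797))]; rw [if_neg (by omega : ¬((7000:Int) ≤ pc ∧ pc ≤ 7799))]; rw [if_pos (by omega : (800:Int) ≤ pc ∧ pc ≤ 899)]; simp only [pvFinishB, pvEntriesB]; norm_num
    all_goals try split_ifs
    all_goals intros
    all_goals first | rfl | (exfalso; omega)
  rcases lt_or_ge pc 1000 with h2|g2
  · rw [pvBis_2 pc g1 h2]
    simp only [pvScanA, pvMapA]; rw [if_neg (by omega : ¬((1000:Int) ≤ pc ∧ pc ≤ 2599))]; rw [if_neg (by omega : ¬((2619:Int) ≤ pc ∧ pc ≤ 2899))]; rw [if_neg (by omega : ¬((2921:Int) ≤ pc ∧ pc ≤ 2999))]; rw [if_neg (by omega : ¬((2600:Int) ≤ pc ∧ pc ≤ 2618))]; rw [if_neg (by omega : ¬((2900:Int) ≤ pc ∧ pc ≤ 2920))]; rw [if_neg (by omega : ¬((3000:Int) ≤ pc ∧ pc ≤ 3999))]; rw [if_neg (by omega : ¬((4000:Int) ≤ pc ∧ pc ≤ 4999))]; rw [if_neg (by omega : ¬((5000:Int) ≤ pc ∧ pc ≤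 5799))]; rw [if_neg (by omega : ¬((6000:Int) ≤ pc ∧ pc ≤ 6797))]; rw [if_neg (by omega : ¬((7000:Int) ≤ pc ∧ pc ≤ 7799))]; rw [if_neg (by omega : ¬((800:Int) ≤ pc ∧ pc ≤ 899))]; rw [if_pos (by omega : (900:Int) ≤ pc ∧ pc ≤ 999)]; simp only [pvFinishB, pvEntriesB]; norm_num
    all_goals try split_ifs
    all_goals intros
    all_goals first | rfl | (exfalso; omega)
  rcases lt_or_ge pc 2600 with h3|g3
  · rw [pvBis_3 pc g2 h3]
    simp only [pvScanA, pvMapA]; rw [if_pos (by omega : (1000:Int) ≤ pc ∧ pc ≤ 2599)]; simp only [pvFinishB, pvEntriesB]; norm_num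
    all_goals try split_ifs
    all_goals intros
    all_goals first | rfl | (exfalso; omega)
  rcases lt_or_ge pc 2619 with h4|g4
  · rw [pvBis_4 pc g3 h4]
    simp only [pvScanA, pvMapA]; rw [if_neg (by omega : ¬((1000:Int) ≤ pc ∧ pc ≤ 2599))]; rw [if_neg (by omega : ¬((2619:Int) ≤ pc ∧ pc ≤ 2899))]; rw [if_neg (by omega : ¬((2921:Int) ≤ pc ∧ pc ≤ 2999))]; rw [if_pos (by omega : (2600:Int) ≤ pc ∧ pc ≤ 2618)]; simp only [pvFinishB, pvEntriesB]; norm_num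
    all_goals try split_ifs
    all_goals intros
    all_goals first | rfl | (exfalso; omega)
  rcases lt_or_ge pc 2900 with h5|g5
  · rw [pvBis_5 pc g4 h5]
    simp only [pvScanA, pvMapA]; rw [if_neg (by omega : ¬((1000:Int) ≤ pc ∧ pc ≤ 2599))]; rw [if_pos (by omega : (2619:Int) ≤ pc ∧ pc ≤ 2899)]; simp only [pvFinishB, pvEntriesB]; norm_num
    all_goals try split_ifs
    all_goals intros
    all_goals first | rfl | (exfalso; omega)
  rcases lt_or_ge pc 2921 with h6|g6
  · rw [pvBis_6 pc g5 h6]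
    simp only [pvScanA, pvMapA]; rw [if_neg (by omega : ¬((1000:Int) ≤ pc ∧ pc ≤ 2599))]; rw [if_neg (by omega : ¬((2619:Int) ≤ pc ∧ pc ≤ 2899))]; rw [if_neg (by omega : ¬((2921:Int) ≤ pc ∧ pc ≤ 2999))]; rw [if_neg (by omega : ¬((2600:Int) ≤ pc ∧ pc ≤ 2618))]; rw [if_pos (by omega : (2900:Int) ≤ pc ∧ pc ≤ 2920)]; simp only [pvFinishB, pvEntriesB]; norm_num
    all_goals try split_ifs
    all_goals intros
    all_goals first | rfl | (exfalso; omega)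
  rcases lt_or_ge pc 3000 with h7|g7
  · rw [pvBis_7 pc g6 h7]
    simp only [pvScanA, pvMapA]; rw [if_neg (by omega : ¬((1000:Int) ≤ pc ∧ pc ≤ 2599))]; rw [if_neg (by omega : ¬((2619:Int) ≤ pc ∧ pc ≤ 2899))]; rw [if_pos (by omega : (2921:Int) ≤ pc ∧ pc ≤ 2999)]; simp only [pvFinishB, pvEntriesB]; norm_num
    all_goals try split_ifs
    all_goals intros
    all_goals first | rfl | (exfalso; omega)
  rcases lt_or_ge pc 4000 with h8|g8
  · rw [pvBis_8 pc g7 h8]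
    simp only [pvScanA, pvMapA]; rw [if_neg (by omega : ¬((1000:Int) ≤ pc ∧ pc ≤ 2599))]; rw [if_neg (by omega : ¬((2619:Int) ≤ pc ∧ pc ≤ 2899))]; rw [if_neg (by omega : ¬((2921:Int) ≤ pc ∧ pc ≤ 2999))]; rw [if_neg (by omega : ¬((2600:Int) ≤ pc ∧ pc ≤ 2618))]; rw [if_neg (by omega : ¬((2900:Int) ≤ pc ∧ pc ≤ 2920))]; rw [if_pos (by omega : (3000:Int) ≤ pc ∧ pc ≤ 3999)]; simp only [pvFinishB, pvEntriesB]; norm_num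
    all_goals try split_ifs
    all_goals intros
    all_goals first | rfl | (exfalso; omega)
  rcases lt_or_ge pc 5000 with h9|g9
  · rw [pvBis_9 pc g8 h9]
    simp only [pvScanA, pvMapA]; rw [if_neg (by omega : ¬((1000:Int) ≤ pc ∧ pc ≤ 2599))]; rw [if_neg (by omega : ¬((2619:Int) ≤ pc ∧ pc ≤ 2899))]; rw [if_neg (by omega : ¬((2921:Int) ≤ pc ∧ pc ≤ 2999))]; rw [if_neg (by omega : ¬((2600:Int) ≤ pc ∧ pc ≤ 2618))]; rw [if_neg (by omega : ¬((2900:Int) ≤ pc ∧ pc ≤ 2920))]; rw [if_neg (by omega : ¬((3000:Int) ≤ pc ∧ pc ≤ 3999))]; rw [if_pos (by omega : (4000:Int) ≤ pc ∧ pc ≤ 4999)]; simp only [pvFinishB, pvEntriesB]; norm_num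
    all_goals try split_ifs
    all_goals intros
    all_goals first | rfl | (exfalso; omega)
  rcases lt_or_ge pc 6000 with h10|g10
  · rw [pvBis_10 pc g9 h10]
    simp only [pvScanA, pvMapA]; rw [if_neg (by omega : ¬((1000:Int) ≤ pc ∧ pc ≤ 2599))]; rw [if_neg (by omega : ¬((2619:Int) ≤ pc ∧ pc ≤ 2899))]; rw [if_neg (by omega : ¬((2921:Int) ≤ pc ∧ pc ≤ 2999))]; rw [if_neg (by omega : ¬((2600:Int) ≤ pc ∧ pc ≤ 2618))]; rw [if_neg (by omega : ¬((2900:Int) ≤ pc ∧ pc ≤ 2920))]; rw [if_neg (by omega : ¬((3000:Int) ≤ pc ∧ pc ≤ 3999))]; rw [if_neg (by omega : ¬((4000:Int) ≤ pc ∧ pc ≤ 4999))]; rw [if_neg (by omega : ¬((6000:Int) ≤ pc ∧ pc ≤ 6797))]; rw [if_neg (by omega : ¬((7000:Int) ≤ pc ∧ pc ≤ 7799))]; rw [if_neg (by omega : ¬((800:Int) ≤ pc ∧ pc ≤ 899))]; rw [if_neg (by omega : ¬((900:Int) ≤ pc ∧ pc ≤ 999))]; simp only [pvFinishB, pvEntriesB];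 norm_num
    all_goals try split_ifs
    all_goals intros
    all_goals first | rfl | (exfalso; omega)
  rcases lt_or_ge pc 7000 with h11|g11
  · rw [pvBis_11 pc g10 h11]
    simp only [pvScanA, pvMapA]; rw [if_neg (by omega : ¬((1000:Int) ≤ pc ∧ pc ≤ 2599))]; rw [if_neg (by omega : ¬((2619:Int) ≤ pc ∧ pc ≤ 2899))]; rw [if_neg (by omega : ¬((2921:Int) ≤ pc ∧ pc ≤ 2999))]; rw [if_neg (by omega : ¬((2600:Int) ≤ pc ∧ pc ≤ 2618))]; rw [if_neg (by omega : ¬((2900:Int) ≤ pc ∧ pc ≤ 2920))]; rw [if_neg (by omega : ¬((3000:Int) ≤ pc ∧ pc ≤ 3999))]; rw [if_neg (by omega : ¬((4000:Int) ≤ pc ∧ pc ≤ 4999))]; rw [if_neg (by omega : ¬((5000:Int) ≤ pc ∧ pc ≤ 5799))]; rw [if_neg (by omega : ¬((7000:Int) ≤ pc ∧ pc ≤ 7799))]; rw [if_neg (by omega : ¬((800:Int) ≤ pc ∧ pc ≤ 899))]; rw [if_neg (by omega : ¬((900:Int) ≤ pc ∧ pc ≤ 999))]; simp only [pvFinishB,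 pvEntriesB]; norm_num
    all_goals try split_ifs
    all_goals intros
    all_goals first | rfl | (exfalso; omega)
  rw [pvBis_12 pc g11]
  simp only [pvScanA, pvMapA]; rw [if_neg (by omega : ¬((1000:Int) ≤ pc ∧ pc ≤ 2599))]; rw [if_neg (by omega : ¬((2619:Int) ≤ pc ∧ pc ≤ 2899))]; rw [if_neg (by omega : ¬((2921:Int) ≤ pc ∧ pc ≤ 2999))]; rw [if_neg (by omega : ¬((2600:Int) ≤ pc ∧ pc ≤ 2618))]; rw [if_neg (by omega : ¬((2900:Int) ≤ pc ∧ pc ≤ 2920))]; rw [if_neg (by omega : ¬((3000:Int) ≤ pc ∧ pc ≤ 3999))]; rw [if_neg (by omega : ¬((4000:Int) ≤ pc ∧ pc ≤ 4999))]; rw [if_neg (by omega : ¬((5000:Int) ≤ pc ∧ pc ≤ 5799))]; rw [if_neg (by omega : ¬((6000:Int) ≤ pc ∧ pc ≤ 6797))]; rw [if_neg (by omega : ¬((800:Int) ≤ pc ∧ pc ≤ 899))]; rw [if_neg (by omega : ¬((900:Int) ≤ pc ∧ pc ≤ 999))]; simp only [pvFinishB, pvEntriesB]; norm_num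
  all_goals try split_ifs
  all_goals intros
  all_goals first | rfl | (exfalso; omega)

-- ===== VERDICT (by name: the statement is the Claim_ definition above) =====
theorem postcode_to_state_spec : Claim_equal_postcode_to_state := by
  intro postcode _
  unfold Spec_postcode_to_state postcode_to_state postcode_to_state_alt
  cases PySem.Int.ofStr? postcode with
  | none => rfl
  | some pc => exact pvNumeric_eq pc
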